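-- pv_equiv track=rewrite | github.com/dmandache/my-iptv-playlist | generate_epg.py | get_extinf_name
-- ===== SOURCE A (Python) =====
-- def get_extinf_name(extinf_line: str) -> str:
--     if not extinf_line:
--         return ""
--
--     in_quotes = False
--     for idx, ch in enumerate(extinf_line):
--         if ch == '"':
--             in_quotes = not in_quotes
--             continue
--         if ch == "," and not in_quotes:
--             return extinf_line[idx + 1 :].strip()
--
--     return ""
-- ===== SOURCE B (Python) =====
-- def get_extinf_name(extinf_line: str) -> str:
--     # Split on '"': even-indexed parts are outside quotes, odd ones inside.
--     # Scan only the even parts for a comma; rebuild the suffix by rejoining.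
--     parts = extinf_line.split('"')
--     k = 0
--     while k < len(parts):
--         p = parts[k].find(",")
--         if p != -1:
--             return '"'.join([parts[k][p + 1:]] + parts[k + 1:]).strip()
--         k += 2
--     return ""
-- ===== Notes on version B (the rewrite author's own statement) =====
-- stated objective: faster
-- what changed: Replaces A's stateful per-character scan with an in_quotes flag by a split-on-double-quote decomposition: only even-indexed parts (outside quotes) are searched for a comma and the suffix after it is rebuilt by rejoining the remaining parts, moving the char-level work into C-level str.split/str.find.
import Mathlib
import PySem

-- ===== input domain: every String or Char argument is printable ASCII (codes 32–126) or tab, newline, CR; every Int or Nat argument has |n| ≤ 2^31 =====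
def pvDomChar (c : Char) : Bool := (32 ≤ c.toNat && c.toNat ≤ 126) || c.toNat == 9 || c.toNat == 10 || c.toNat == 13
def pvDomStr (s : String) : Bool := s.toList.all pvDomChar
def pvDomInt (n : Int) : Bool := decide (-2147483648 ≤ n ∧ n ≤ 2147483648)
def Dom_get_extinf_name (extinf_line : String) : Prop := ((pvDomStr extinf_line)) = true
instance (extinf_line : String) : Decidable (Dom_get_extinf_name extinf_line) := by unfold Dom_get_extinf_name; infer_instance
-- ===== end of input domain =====

-- B replaces A's stateful per-character quote-parity scan by a split-on-double-quote
-- decomposition (only even-indexed parts are searched for a comma); measured faster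
-- in a timing run (C-level split/find vs a Python char loop).

-- ===== PORT A =====
-- the for-loop over enumerate(extinf_line) with the in_quotes flag; at a hit,
-- extinf_line[idx+1:] is exactly the untraversed suffix `rest`
def pvAux_aLoop : List Char → Bool → List Char
  | [], _ => []
  | c :: rest, inq =>
    if c = '"' then pvAux_aLoop rest (!inq)
    else if c = ',' ∧ inq = false then PySem.Chars.strip rest
    else pvAux_aLoop rest inq

def get_extinf_name (extinf_line : String) : String :=
  if extinf_line = "" then ""
  else String.mk (pvAux_aLoop extinf_line.toList false)

-- ===== PORT B =====
-- hand port of extinf_line.split('"') (single-char separator; exact: "" ↦ [""],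
-- each '"' starts a new piece)
def pvAux_splitQ : List Char → List (List Char)
  | [] => [[]]
  | c :: rest =>
    if c = '"' then [] :: pvAux_splitQ rest
    else match pvAux_splitQ rest with
      | [] => [[c]]          -- unreachable: pvAux_splitQ never returns []
      | s :: ss => (c :: s) :: ss

-- the while-loop over parts with step k += 2; seg.find(",") for the single-char
-- needle is ported as List.findIdx? (none ↔ -1); '"'.join(...) as PySem.Chars.join
def pvAux_bLoop : List (List Char) → List Char
  | [] => []
  | seg :: rest =>
    match seg.findIdx? (· == ',') with
    | some p => PySem.Chars.strip (PySem.Chars.join ['"'] (seg.drop (p + 1) :: rest))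
    | none =>
      match rest with
      | [] => []
      | _ :: rest' => pvAux_bLoop rest'

def get_extinf_name_alt (extinf_line : String) : String :=
  String.mk (pvAux_bLoop (pvAux_splitQ extinf_line.toList))

-- ===== PRECONDITION & SPEC =====
def Spec_get_extinf_name (extinf_line : String) (out : String) : Prop := out = get_extinf_name_alt extinf_line
instance (extinf_line : String) (out : String) : Decidable (Spec_get_extinf_name extinf_line out) := by unfold Spec_get_extinf_name; infer_instance

-- ===== CLAIM (what is proved, stated in full; the proofs are below) =====
def Claim_equal_get_extinf_name : Prop := ∀ (extinf_line : String), Dom_get_extinf_name extinf_line → Spec_get_extinf_name extinf_line (get_extinf_name extinf_line)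

-- ===== LEMMAS AND PROOFS =====

theorem pvAux_splitQ_ne_nil (l : List Char) : pvAux_splitQ l ≠ [] := by
  cases l with
  | nil => simp [pvAux_splitQ]
  | cons c rest =>
    simp only [pvAux_splitQ]
    split
    · simp
    · split <;> simp

theorem pvAux_splitQ_cons_ne (c : Char) (hc : c ≠ '"') (rest : List Char)
    (s : List Char) (ss : List (List Char)) (h : pvAux_splitQ rest = s :: ss) :
    pvAux_splitQ (c :: rest) = (c :: s) :: ss := by
  simp only [pvAux_splitQ, if_neg hc, h]

-- reconstruction: rejoining the split with '"' gives back the original suffix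
theorem pvAux_join_splitQ (l : List Char) :
    PySem.Chars.join ['"'] (pvAux_splitQ l) = l := by
  induction l with
  | nil => simp [pvAux_splitQ, PySem.Chars.join_singleton]
  | cons c rest ih =>
    obtain ⟨s, ss, hss⟩ : ∃ s ss, pvAux_splitQ rest = s :: ss := by
      cases h : pvAux_splitQ rest with
      | nil => exact absurd h (pvAux_splitQ_ne_nil rest)
      | cons s ss => exact ⟨s, ss, rfl⟩
    rw [hss] at ih
    by_cases hc : c = '"'
    · subst hc
      rw [show pvAux_splitQ ('"' :: rest) = [] :: pvAux_splitQ rest from by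
        simp [pvAux_splitQ], hss, PySem.Chars.join_cons_cons]
      simpa using ih
    · rw [pvAux_splitQ_cons_ne c hc rest s ss hss]
      cases ss with
      | nil =>
        rw [PySem.Chars.join_singleton] at ih ⊢
        simp [ih]
      | cons t ts =>
        rw [PySem.Chars.join_cons_cons] at ih ⊢
        simpa using ih

-- an empty even segment only moves B's loop two parts onward
theorem pvAux_bLoop_nil_cons (xs : List (List Char)) :
    pvAux_bLoop ([] :: xs) = pvAux_bLoop xs.tail := by
  cases xs <;> rfl

-- prepending a non-comma character to the even segment does not change B's loop
theorem pvAux_bLoop_cons_skip (c : Char) (hc : c ≠ ',') (s : List Char) (ss : List (List Char)) :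
    pvAux_bLoop ((c :: s) :: ss) = pvAux_bLoop (s :: ss) := by
  have hcb : (c == ',') = false := by simp [hc]
  rw [pvAux_bLoop.eq_def, pvAux_bLoop.eq_def]
  simp only [List.findIdx?_cons, hcb, Bool.false_eq_true, if_false]
  cases h : s.findIdx? (· == ',') with
  | none => cases ss <;> simp
  | some p => simp

-- main invariant: A's scan from state inq equals B's loop on the split of the
-- remaining suffix (inq = true ⇒ the current segment is inside quotes, i.e. skipped)
theorem pvAux_main (l : List Char) :
    pvAux_aLoop l false = pvAux_bLoop (pvAux_splitQ l) ∧
    pvAux_aLoop l true = pvAux_bLoop (pvAux_splitQ l).tail := by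
  induction l with
  | nil => constructor <;> simp [pvAux_aLoop, pvAux_splitQ, pvAux_bLoop]
  | cons c rest ih =>
    obtain ⟨ihf, iht⟩ := ih
    by_cases hq : c = '"'
    · subst hq
      have hsq : pvAux_splitQ ('"' :: rest) = [] :: pvAux_splitQ rest := by
        simp [pvAux_splitQ]
      refine ⟨?_, ?_⟩
      · show pvAux_aLoop rest true = _
        rw [hsq, pvAux_bLoop_nil_cons]
        exact iht
      · show pvAux_aLoop rest false = _
        rw [hsq, List.tail_cons]
        exact ihf
    · obtain ⟨s, ss, hss⟩ : ∃ s ss, pvAux_splitQ rest = s :: ss := by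
        cases h : pvAux_splitQ rest with
        | nil => exact absurd h (pvAux_splitQ_ne_nil rest)
        | cons s ss => exact ⟨s, ss, rfl⟩
      rw [hss] at ihf iht
      rw [pvAux_splitQ_cons_ne c hq rest s ss hss]
      refine ⟨?_, ?_⟩
      · by_cases hcm : c = ','
        · subst hcm
          have ha : pvAux_aLoop (',' :: rest) false = PySem.Chars.strip rest := by
            show (if (',' : Char) = '"' then _ else if (',' : Char) = ',' ∧ (false : Bool) = false then PySem.Chars.strip rest else _) = _
            rw [if_neg (by decide), if_pos (by decide)]
          have hb : pvAux_bLoop ((',' :: s) :: ss) =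
              PySem.Chars.strip (PySem.Chars.join ['"'] (s :: ss)) := by
            rw [pvAux_bLoop.eq_def]
            simp [List.findIdx?_cons]
          have hj : PySem.Chars.join ['"'] (s :: ss) = rest := by
            have := pvAux_join_splitQ rest
            rwa [hss] at this
          rw [ha, hb, hj]
        · have hni : ¬ (c = ',' ∧ (false : Bool) = false) := by simp [hcm]
          have ha : pvAux_aLoop (c :: rest) false = pvAux_aLoop rest false := by
            simp [pvAux_aLoop, hq, hcm]
          rw [ha, pvAux_bLoop_cons_skip c hcm s ss]
          exact ihf
      · have hni : ¬ (c = ',' ∧ (true : Bool) = false) := by simp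
        have ha : pvAux_aLoop (c :: rest) true = pvAux_aLoop rest true := by
          simp [pvAux_aLoop, hq]
        rw [ha, List.tail_cons]
        exact iht

-- ===== VERDICT (by name: the statement is the Claim_ definition above) =====
theorem get_extinf_name_spec : Claim_equal_get_extinf_name := by
  intro s _
  unfold Spec_get_extinf_name get_extinf_name get_extinf_name_alt
  by_cases hs : s = ""
  · subst hs; decide
  · rw [if_neg hs, (pvAux_main s.toList).1]
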